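-- pv_equiv track=rewrite | github.com/Evilnames/Collector | sculpture.py | _make_cartouche_grid
-- ===== SOURCE A (Python) =====
-- def _empty(h):
--     return [[False] * 8 for _ in range(h * 4)]
--
-- def _make_cartouche_grid(height):
--     """Ornamental scroll tablet: narrow rolled ends, rectangular body, recessed inner panel."""
--     rows = height * 4
--     g    = _empty(height)
--     for r in range(rows):
--         if r == 0 or r == rows - 1:
--             for c in range(2, 6): g[r][c] = True          # narrow scroll terminal
--         else:
--             g[r] = [True] * 8
--     # Recessed inner panel on taller versions
--     if rows >= 8:
--         for r in range(2, rows - 2):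
--             g[r][2] = g[r][3] = g[r][4] = g[r][5] = False
--     return g
-- ===== SOURCE B (Python) =====
-- def _make_cartouche_grid(height):
--     """Ornamental scroll tablet: one-pass predicate-driven grid, no overwrite passes."""
--     rows = height * 4
--
--     def cell(r, c):
--         if r == 0 or r == rows - 1:
--             return 2 <= c <= 5
--         if rows >= 8 and 2 <= r <= rows - 3 and 2 <= c <= 5:
--             return False
--         return True
--
--     return [[cell(r, c) for c in range(8)] for r in range(rows)]
-- ===== Notes on version B (the rewrite author's own statement) =====
-- stated objective: simpler
-- what changed: Replaced the allocate-then-mutate version (empty grid, row-overwrite loop, then a second pass carving the recessed panel) with a single nested comprehension where each cell is decided directly by a predicate on (r, c).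
import Mathlib
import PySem

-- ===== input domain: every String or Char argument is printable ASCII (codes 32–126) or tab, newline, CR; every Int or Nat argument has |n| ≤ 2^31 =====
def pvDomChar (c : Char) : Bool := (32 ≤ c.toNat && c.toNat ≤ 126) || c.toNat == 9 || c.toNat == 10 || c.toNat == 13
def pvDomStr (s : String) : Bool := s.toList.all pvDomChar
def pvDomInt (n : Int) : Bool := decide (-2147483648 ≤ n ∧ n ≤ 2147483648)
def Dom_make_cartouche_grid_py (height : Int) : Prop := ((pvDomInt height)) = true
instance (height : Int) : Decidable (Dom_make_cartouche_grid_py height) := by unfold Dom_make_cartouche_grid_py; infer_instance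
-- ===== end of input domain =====

-- B replaces A's allocate-then-mutate passes by one predicate-driven nested comprehension (simpler, same cost).

-- ===== PORT A =====
-- _empty(h): [[False] * 8 for _ in range(h * 4)]  (range of a negative int is empty, as is List.range of toNat)
def cartoucheEmpty (h : Int) : List (List Bool) :=
  (List.range (h * 4).toNat).map (fun _ => List.replicate 8 false)

-- body of 'for r in range(rows)': mutates only g[r]
def cartoucheBody (rows : Int) (r : Nat) (row : List Bool) : List Bool :=
  if r = 0 ∨ (r : Int) = rows - 1 then
    -- for c in range(2, 6): g[r][c] = True
    (List.range' 2 4).foldl (fun row c => row.set c true) row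
  else
    List.replicate 8 true

-- panel pass body: g[r][2] = g[r][3] = g[r][4] = g[r][5] = False
def cartouchePanel (row : List Bool) : List Bool :=
  (((row.set 2 false).set 3 false).set 4 false).set 5 false

def make_cartouche_grid_py (height : Int) : List (List Bool) :=
  let rows := height * 4
  let g0 := cartoucheEmpty height
  let g1 := (List.range rows.toNat).foldl (fun g r => g.modify r (cartoucheBody rows r)) g0
  if 8 ≤ rows then
    -- for r in range(2, rows - 2): indices 2 .. rows-3, i.e. rows-4 of them
    (List.range' 2 (rows.toNat - 4)).foldl (fun g r => g.modify r cartouchePanel) g1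
  else g1

-- ===== PORT B =====
def cartoucheCell (rows : Int) (r c : Nat) : Bool :=
  if r = 0 ∨ (r : Int) = rows - 1 then decide (2 ≤ c ∧ c ≤ 5)
  else if 8 ≤ rows ∧ 2 ≤ (r : Int) ∧ (r : Int) ≤ rows - 3 ∧ 2 ≤ c ∧ c ≤ 5 then false
  else true

def make_cartouche_grid_py_alt (height : Int) : List (List Bool) :=
  let rows := height * 4
  (List.range rows.toNat).map (fun r => (List.range 8).map (fun c => cartoucheCell rows r c))

-- ===== PRECONDITION & SPEC =====
def Spec_make_cartouche_grid_py (height : Int) (out : List (List Bool)) : Prop := out = make_cartouche_grid_py_alt height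
instance (height : Int) (out : List (List Bool)) : Decidable (Spec_make_cartouche_grid_py height out) := by unfold Spec_make_cartouche_grid_py; infer_instance

-- ===== CLAIM (what is proved, stated in full; the proofs are below) =====
def Claim_equal_make_cartouche_grid_py : Prop := ∀ (height : Int), Dom_make_cartouche_grid_py height → Spec_make_cartouche_grid_py height (make_cartouche_grid_py height)

-- ===== LEMMAS AND PROOFS =====

-- folding 'modify' over indices not containing i leaves slot i alone
theorem foldl_modify_getElem?_not_mem {α : Type} (F : Nat → α → α) (i : Nat) :
    ∀ (rs : List Nat) (g : List α), i ∉ rs →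
      (rs.foldl (fun g r => g.modify r (F r)) g)[i]? = g[i]? := by
  intro rs
  induction rs with
  | nil => intro g _; rfl
  | cons r rs ih =>
    intro g hi
    simp only [List.mem_cons, not_or] at hi
    simp only [List.foldl_cons]
    rw [ih _ hi.2, List.getElem?_modify]
    simp [Ne.symm hi.1]

-- folding 'modify' over distinct indices containing i applies F i once to slot i
theorem foldl_modify_getElem?_mem {α : Type} (F : Nat → α → α) (i : Nat) :
    ∀ (rs : List Nat) (g : List α), rs.Nodup → i ∈ rs →
      (rs.foldl (fun g r => g.modify r (F r)) g)[i]? = (g[i]?).map (F i) := by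
  intro rs
  induction rs with
  | nil => intro g _ h; simp at h
  | cons r rs ih =>
    intro g hnd hi
    simp only [List.nodup_cons] at hnd
    simp only [List.foldl_cons]
    rcases List.mem_cons.mp hi with h | h
    · subst h
      rw [foldl_modify_getElem?_not_mem _ _ _ _ hnd.1, List.getElem?_modify]
      simp
    · rw [ih _ hnd.2 h, List.getElem?_modify]
      by_cases hri : r = i
      · subst hri; exact absurd h hnd.1
      · simp [hri]

theorem make_cartouche_grid_py_eq_alt (height : Int) :
    make_cartouche_grid_py height = make_cartouche_grid_py_alt height := by
  apply List.ext_getElem?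
  intro i
  set rows := height * 4 with hrows
  set n := rows.toNat with hn
  -- B side
  have hB : (make_cartouche_grid_py_alt height)[i]? =
      if i < n then some ((List.range 8).map (fun c => cartoucheCell rows i c)) else none := by
    simp only [make_cartouche_grid_py_alt, ← hrows, ← hn, List.getElem?_map]
    by_cases h : i < n <;> simp [h]
  -- A side: g0, then the row loop
  have hg0 : (cartoucheEmpty height)[i]? =
      if i < n then some (List.replicate 8 false) else none := by
    simp only [cartoucheEmpty, ← hrows, ← hn, List.getElem?_map]
    by_cases h : i < n <;> simp [h]
  have hg1 : ((List.range n).foldl (fun g r => g.modify r (cartoucheBody rows r))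
        (cartoucheEmpty height))[i]? =
      if i < n then some (cartoucheBody rows i (List.replicate 8 false)) else none := by
    by_cases h : i < n
    · rw [foldl_modify_getElem?_mem _ _ _ _ List.nodup_range (List.mem_range.mpr h), hg0]
      simp [h]
    · rw [foldl_modify_getElem?_not_mem _ _ _ _ (by simpa using h), hg0]
      simp [h]
  show (make_cartouche_grid_py height)[i]? = _
  rw [hB]
  simp only [make_cartouche_grid_py, ← hrows, ← hn]
  by_cases h8 : 8 ≤ rows
  · have hn8 : 8 ≤ n := by omega
    have hnr : (n : Int) = rows := by omega
    simp only [if_pos h8]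
    by_cases hpan : i ∈ List.range' 2 (n - 4)
    · rw [foldl_modify_getElem?_mem _ _ _ _ (List.nodup_range' ..) hpan, hg1]
      have hir : 2 ≤ i ∧ i < n - 2 := by
        have := List.mem_range'_1.mp hpan; omega
      have hlt : i < n := by omega
      simp only [if_pos hlt, Option.map_some]
      congr 1
      have hne0 : ¬(i = 0 ∨ (i : Int) = rows - 1) := by
        rintro (h | h) <;> omega
      have hcond : 8 ≤ rows ∧ 2 ≤ (i : Int) ∧ (i : Int) ≤ rows - 3 := ⟨h8, by omega, by omega⟩
      simp only [cartoucheBody, if_neg hne0]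
      simp only [cartouchePanel]
      -- both sides are now closed 8-element rows
      have : (List.range 8).map (fun c => cartoucheCell rows i c) =
          [true, true, false, false, false, false, true, true] := by
        simp [List.range_succ, cartoucheCell, if_neg hne0, hcond.1, hcond.2.1, hcond.2.2]
      rw [this]; decide
    · rw [foldl_modify_getElem?_not_mem _ _ _ _ hpan, hg1]
      by_cases hlt : i < n
      · simp only [if_pos hlt]
        congr 1
        have hout : ¬(2 ≤ i ∧ i < n - 2) := by
          intro hc; exact hpan (List.mem_range'_1.mpr ⟨hc.1, by omega⟩)
        by_cases hedge : i = 0 ∨ (i : Int) = rows - 1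
        · have : (List.range 8).map (fun c => cartoucheCell rows i c) =
              [false, false, true, true, true, true, false, false] := by
            simp [List.range_succ, cartoucheCell, if_pos hedge]
          rw [this]
          simp only [cartoucheBody, if_pos hedge]
          decide
        · -- interior row untouched by the panel: i = 1 or i = n - 2
          have hi0 : i ≠ 0 := fun h => hedge (Or.inl h)
          have hin : (i : Int) ≠ rows - 1 := fun h => hedge (Or.inr h)
          have h1 : i = 1 ∨ i = n - 2 := by omega
          have hnopanel : ¬(8 ≤ rows ∧ 2 ≤ (i : Int) ∧ (i : Int) ≤ rows - 3 ∧ True) := by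
            intro hc; rcases h1 with h1 | h1 <;> omega
          have : (List.range 8).map (fun c => cartoucheCell rows i c) = List.replicate 8 true := by
            simp only [cartoucheCell, if_neg hedge]
            have : ∀ c, (if 8 ≤ rows ∧ 2 ≤ (i : Int) ∧ (i : Int) ≤ rows - 3 ∧ 2 ≤ c ∧ c ≤ 5 then false else true) = true := by
              intro c
              rw [if_neg]
              intro hc
              rcases h1 with h1 | h1 <;> omega
            simp only [List.range_succ, List.map_append, List.map_cons, List.map_nil, this]
            decide
          rw [this]
          simp [cartoucheBody, if_neg hedge]
      · simp [hlt]
  · -- rows < 8 (so n ≤ 7; in fact n = 0 or n = 4)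
    simp only [if_neg h8]
    rw [hg1]
    by_cases hlt : i < n
    · have hn7 : n ≤ 7 := by omega
      simp only [if_pos hlt]
      congr 1
      by_cases hedge : i = 0 ∨ (i : Int) = rows - 1
      · have : (List.range 8).map (fun c => cartoucheCell rows i c) =
            [false, false, true, true, true, true, false, false] := by
          simp [List.range_succ, cartoucheCell, if_pos hedge]
        rw [this]
        simp only [cartoucheBody, if_pos hedge]
        decide
      · have : (List.range 8).map (fun c => cartoucheCell rows i c) = List.replicate 8 true := by
          simp only [cartoucheCell, if_neg hedge]
          have hno : ∀ c : Nat, (if 8 ≤ rows ∧ 2 ≤ (i : Int) ∧ (i : Int) ≤ rows - 3 ∧ 2 ≤ c ∧ c ≤ 5 then false else true) = true := by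
            intro c; rw [if_neg]; intro hc; omega
          simp only [List.range_succ, List.map_append, List.map_cons, List.map_nil, hno]
          decide
        rw [this]
        simp [cartoucheBody, if_neg hedge]
    · simp [hlt]

-- ===== VERDICT (by name: the statement is the Claim_ definition above) =====
theorem make_cartouche_grid_py_spec : Claim_equal_make_cartouche_grid_py := by
  intro height _
  unfold Spec_make_cartouche_grid_py
  exact make_cartouche_grid_py_eq_alt height
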